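-- pv_equiv track=rewrite | github.com/SimengBian/Topologies | hypercube.py | ID2Addr
-- ===== SOURCE A (Python) =====
-- def ID2Addr(x,n):
-- 	addr = [0 for i in range(n)]
-- 	num = x
-- 	i = n - 1
-- 	while i>=0:
-- 		if num==0:
-- 			addr[i] = 0
-- 			break
-- 		num,rem = divmod(num,2)
-- 		addr[i] = rem
-- 		i = i - 1
-- 	return addr + []
-- ===== SOURCE B (Python) =====
-- def ID2Addr(x, n):
--     return [(x >> (n - 1 - i)) % 2 for i in range(n)]
-- ===== Notes on version B (the rewrite author's own statement) =====
-- stated objective: idiomatic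
-- what changed: B extracts each bit independently by arithmetic right shift and %2 in one comprehension, instead of A's mutable zero-filled array written back-to-front by a divmod loop with an early break.
import Mathlib
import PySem

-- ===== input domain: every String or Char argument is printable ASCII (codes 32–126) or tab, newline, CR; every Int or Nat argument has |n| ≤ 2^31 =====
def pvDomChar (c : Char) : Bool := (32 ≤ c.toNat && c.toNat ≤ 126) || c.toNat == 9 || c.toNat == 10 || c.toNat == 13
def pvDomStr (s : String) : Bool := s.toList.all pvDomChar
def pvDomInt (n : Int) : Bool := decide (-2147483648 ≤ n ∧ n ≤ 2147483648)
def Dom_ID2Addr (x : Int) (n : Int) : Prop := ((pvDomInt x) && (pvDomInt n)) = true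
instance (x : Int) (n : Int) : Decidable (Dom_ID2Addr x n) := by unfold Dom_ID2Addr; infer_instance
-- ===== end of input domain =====

-- B replaces A's divmod loop over a mutable zero-filled array with per-bit shift-and-mod extraction (idiomatic; same cost).

-- ===== PORT A =====
-- the while loop: state (num, i, addr); 'addr[i] = v' is List.set (i is always in range when reached)
def ID2AddrLoopA (num : Int) (i : Int) (addr : List Int) : List Int :=
  if _h : 0 ≤ i then
    if num = 0 then addr.set i.toNat 0
    else ID2AddrLoopA (PySem.Int.floordiv num 2) (i - 1) (addr.set i.toNat (PySem.Int.mod num 2))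
  else addr
termination_by (i + 1).toNat
decreasing_by omega

def ID2Addr (x : Int) (n : Int) : List Int :=
  let addr := (PySem.List.pyRange 0 n 1).map (fun _ => (0 : Int))
  ID2AddrLoopA x (n - 1) addr ++ []

-- ===== PORT B =====
-- [(x >> (n-1-i)) % 2 for i in range(n)]  (shift count n-1-i is ≥ 0 for every i in range(n))
def ID2Addr_alt (x : Int) (n : Int) : List Int :=
  (PySem.List.pyRange 0 n 1).map (fun i => PySem.Int.mod (x >>> (n - 1 - i).toNat) 2)

-- ===== PRECONDITION & SPEC =====
def Spec_ID2Addr (x : Int) (n : Int) (out : List Int) : Prop := out = ID2Addr_alt x n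
instance (x : Int) (n : Int) (out : List Int) : Decidable (Spec_ID2Addr x n out) := by unfold Spec_ID2Addr; infer_instance

-- ===== CLAIM (what is proved, stated in full; the proofs are below) =====
def Claim_equal_ID2Addr : Prop := ∀ (x : Int) (n : Int), Dom_ID2Addr x n → Spec_ID2Addr x n (ID2Addr x n)

-- ===== LEMMAS AND PROOFS =====

theorem shiftRight_succ_div (x : Int) (k : Nat) : x >>> (k + 1) = (x / 2) >>> k := by
  rw [Int.shiftRight_eq_div_pow, Int.shiftRight_eq_div_pow, pow_succ']
  push_cast
  exact (Int.ediv_ediv_of_nonneg (by omega)).symm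

theorem loopA_length (num : Int) (i : Int) (addr : List Int) :
    (ID2AddrLoopA num i addr).length = addr.length := by
  fun_induction ID2AddrLoopA num i addr <;> simp_all

theorem loopA_getD (num : Int) (i : Int) (addr : List Int) :
    i < (addr.length : Int) →
    (∀ m : Nat, (m : Int) ≤ i → addr.getD m 0 = 0) → ∀ j : Nat, j < addr.length →
    (ID2AddrLoopA num i addr).getD j 0 =
      if (j : Int) ≤ i then PySem.Int.mod (num >>> (i - j).toNat) 2 else addr.getD j 0 := by
  fun_induction ID2AddrLoopA num i addr with
  | case1 i addr h0 =>
    -- num = 0: write 0 at i and stop; everything at or below i is already 0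
    intro hlt hz j hj
    have hzero : ∀ k : Nat, PySem.Int.mod ((0 : Int) >>> k) 2 = 0 := by
      intro k; simp [PySem.Int.mod]
    by_cases hji : (j : Int) ≤ i
    · rw [if_pos hji, hzero]
      by_cases hEq : j = i.toNat
      · subst hEq
        simp [List.getD, hj]
      · rw [List.getD, List.getElem?_set_ne (by omega), ← List.getD]
        exact hz j hji
    · rw [if_neg hji, List.getD, List.getElem?_set_ne (by omega), ← List.getD]
  | case2 num i addr h0 hnum ih =>
    intro hlt hz j hj
    have hset_len : (addr.set i.toNat (PySem.Int.mod num 2)).length = addr.length := by simp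
    have hz' : ∀ m : Nat, (m : Int) ≤ i - 1 →
        (addr.set i.toNat (PySem.Int.mod num 2)).getD m 0 = 0 := by
      intro m hm
      rw [List.getD, List.getElem?_set_ne (by omega), ← List.getD]
      exact hz m (by omega)
    rw [ih (by omega) hz' j (by omega)]
    have hfd : PySem.Int.floordiv num 2 = num / 2 := PySem.Int.floordiv_eq_ediv_of_pos (by omega)
    by_cases h1 : (j : Int) ≤ i - 1
    · rw [if_pos h1, if_pos (by omega)]
      have hk : (i - j).toNat = (i - 1 - j).toNat + 1 := by omega
      rw [hk, shiftRight_succ_div, hfd]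
    · rw [if_neg h1]
      by_cases h2 : (j : Int) ≤ i
      · -- j = i.toNat: the bit just written, num % 2 = (num >>> 0) % 2
        have hEq : j = i.toNat := by omega
        subst hEq
        rw [if_pos h2]
        simp [List.getD, hj]
      · rw [if_neg h2, List.getD, List.getElem?_set_ne (by omega), ← List.getD]
  | case3 num i addr h0 =>
    intro hlt hz j hj
    rw [if_neg (by omega)]

theorem ID2Addr_eq_alt (x : Int) (n : Int) : ID2Addr x n = ID2Addr_alt x n := by
  unfold ID2Addr ID2Addr_alt
  rw [PySem.List.pyRange_one]
  simp only [List.append_nil]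
  have hlen0 : ((List.range (n - 0).toNat).map (fun k : Nat => (0 : Int) + k)).length = (n - 0).toNat := by
    simp
  set zeros : List Int :=
    ((List.range (n - 0).toNat).map (fun k : Nat => (0 : Int) + k)).map (fun _ => (0 : Int)) with hzeros
  have hzlen : zeros.length = (n - 0).toNat := by simp [hzeros]
  have hz : ∀ m : Nat, (m : Int) ≤ n - 1 → zeros.getD m 0 = 0 := by
    intro m _
    by_cases hm : m < zeros.length
    · rw [List.getD_eq_getElem _ _ hm]
      simp [hzeros]
    · rw [List.getD_eq_default _ _ (by omega)]
  apply List.ext_getElem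
  · rw [loopA_length, hzlen]; simp
  · intro j hjl hjr
    rw [← List.getD_eq_getElem _ 0 hjl, ← List.getD_eq_getElem _ 0 hjr]
    have hjn : j < zeros.length := by rw [loopA_length] at hjl; exact hjl
    rw [loopA_getD x (n - 1) zeros (by omega) hz j hjn]
    have hji : (j : Int) ≤ n - 1 := by rw [hzlen] at hjn; omega
    rw [if_pos hji]
    rw [List.getD, List.getElem?_map, List.getElem?_map,
        List.getElem?_range (by rw [hzlen] at hjn; exact hjn)]
    simp only [Option.map_some, Option.getD_some]
    congr 2
    omega

-- ===== VERDICT (by name: the statement is the Claim_ definition above) =====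
theorem ID2Addr_spec : Claim_equal_ID2Addr := by
  intro x n _
  unfold Spec_ID2Addr
  exact ID2Addr_eq_alt x n
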